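-- pv_equiv track=rewrite | github.com/eduardoftoliveira/oniomMacGyver | modules/gaussian.py | digest_brackets
-- ===== SOURCE A (Python) =====
-- def digest_brackets(rsline):
--     """
--         remove spaces before brackets, using commas instead
--         spaces preceeding ( are removed
--         example:
--             opt ( nha, nhe)
--         becomes...
--             opt( nha, nhe)
--     """
--     k = 0
--     newline = ''
--     spaces_buffer = ''
--     for c in rsline:
--         if c == ')':
--             k -= 1
--             if k == 0: # bracketted ready to process and append to newline
--                 newline += bracketted
--         if k == 0:
--             if c == ' ':
--                 spaces_buffer += c
--             elif c != '(':
--                 newline += spaces_buffer + c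
--                 spaces_buffer = ''
--             else:
--                 newline += c
--                 spaces_buffer = ''
--         else:   # k > 0
--             bracketted += c
--         if k < 0:
--             raise RuntimeError('Too many ) brackets in route section')
--         if c == '(':
--             if k == 0:
--                 bracketted = ''
--             spaces_buffer = ''
--             k += 1
--     if k != 0:
--         raise RuntimeError('Too many ( brackets in route section')
--     return newline
-- ===== SOURCE B (Python) =====
-- def digest_brackets(rsline):
--     """
--         remove spaces before brackets, using commas instead
--         spaces preceeding ( are removed
--     """
--     depth = 0
--     out = []
--     for c in rsline:
--         if c == '(' and depth == 0:
--             while out and out[-1] == ' ':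
--                 out.pop()
--             depth = 1
--         elif c == '(':
--             depth += 1
--         elif c == ')':
--             depth -= 1
--             if depth < 0:
--                 raise RuntimeError('Too many ) brackets in route section')
--         out.append(c)
--     if depth != 0:
--         raise RuntimeError('Too many ( brackets in route section')
--     while out and out[-1] == ' ':
--         out.pop()
--     return ''.join(out)
-- ===== Notes on version B (the rewrite author's own statement) =====
-- stated objective: simpler
-- what changed: Replaces A's three string buffers (newline/spaces_buffer/bracketted, with deferred flushing of bracketed text) by a single output list plus an integer depth: spaces before a depth-0 '(' are removed retroactively by popping trailing spaces, and trailing spaces are stripped once at the end.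
import Mathlib
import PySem

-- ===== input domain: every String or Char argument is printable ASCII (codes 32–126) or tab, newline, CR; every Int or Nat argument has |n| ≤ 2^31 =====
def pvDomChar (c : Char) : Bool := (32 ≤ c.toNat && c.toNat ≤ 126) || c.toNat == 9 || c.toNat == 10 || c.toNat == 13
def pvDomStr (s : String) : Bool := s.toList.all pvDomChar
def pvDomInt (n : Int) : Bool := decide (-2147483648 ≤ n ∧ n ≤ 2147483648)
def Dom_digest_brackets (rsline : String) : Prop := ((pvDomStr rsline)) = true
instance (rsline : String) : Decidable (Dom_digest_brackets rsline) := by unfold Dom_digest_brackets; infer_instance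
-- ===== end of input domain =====

-- B replaces A's three buffers by one output list plus a depth counter (spaces before a
-- depth-0 '(' removed retroactively); equivalence is proved on bracket-balanced inputs,
-- where neither program raises.

-- ===== PORT A =====
-- state: (k, newline, spaces_buffer, bracketted); strings kept as List Char
def stepA (st : Int × List Char × List Char × List Char) (c : Char) :
    Int × List Char × List Char × List Char :=
  match st with
  | (k, nl, sp, br) =>
    -- if c == ')': k -= 1; if k == 0: newline += bracketted
    let k1 := if c = ')' then k - 1 else k
    let nl1 := if c = ')' ∧ k1 = 0 then nl ++ br else nl
    -- the k == 0 / else branch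
    let t : List Char × List Char × List Char :=
      if k1 = 0 then
        if c = ' ' then (nl1, sp ++ [c], br)
        else if c ≠ '(' then (nl1 ++ sp ++ [c], [], br)
        else (nl1 ++ [c], [], br)
      else (nl1, sp, br ++ [c])
    -- if c == '(': (reset bracketted at depth 0), clear spaces_buffer, k += 1
    if c = '(' then (k1 + 1, t.1, [], if k1 = 0 then [] else t.2.2)
    else (k1, t.1, t.2.1, t.2.2)

def digest_brackets (rsline : String) : String :=
  String.ofList (rsline.toList.foldl stepA (0, [], [], [])).2.1

-- ===== PORT B =====
-- while out and out[-1] == ' ': out.pop()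
def rstripSp (l : List Char) : List Char := (l.reverse.dropWhile (· == ' ')).reverse

def stepB (st : Int × List Char) (c : Char) : Int × List Char :=
  match st with
  | (d, out) =>
    if c = '(' ∧ d = 0 then (1, rstripSp out ++ [c])
    else if c = '(' then (d + 1, out ++ [c])
    else if c = ')' then (d - 1, out ++ [c])
    else (d, out ++ [c])

def digest_brackets_alt (rsline : String) : String :=
  String.ofList (rstripSp (rsline.toList.foldl stepB (0, [])).2)

-- ===== PRECONDITION & SPEC =====
def brDelta (c : Char) : Int := if c = '(' then 1 else if c = ')' then -1 else 0
def bal (l : List Char) : Int := (l.map brDelta).sum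

-- Pre_ excludes exactly the bracket-unbalanced strings, on which A raises
-- (RuntimeError or NameError) and returns no value.
def Pre_digest_brackets (rsline : String) : Prop :=
  (∀ p ∈ rsline.toList.inits, 0 ≤ bal p) ∧ bal rsline.toList = 0
instance (rsline : String) : Decidable (Pre_digest_brackets rsline) := by
  unfold Pre_digest_brackets; infer_instance

def pvWitness_digest_brackets : String := "opt ( nha, nhe) x"

def Spec_digest_brackets (rsline : String) (out : String) : Prop := out = digest_brackets_alt rsline
instance (rsline : String) (out : String) : Decidable (Spec_digest_brackets rsline out) := by unfold Spec_digest_brackets; infer_instance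

-- ===== CLAIM (what is proved, stated in full; the proofs are below) =====
def Claim_equal_digest_brackets : Prop := ∀ (rsline : String), Dom_digest_brackets rsline → Pre_digest_brackets rsline → Spec_digest_brackets rsline (digest_brackets rsline)

-- ===== LEMMAS AND PROOFS =====

lemma bal_cons (c : Char) (l : List Char) : bal (c :: l) = brDelta c + bal l := by
  simp [bal]

lemma rstripSp_append_spaces (a b : List Char) (hb : ∀ x ∈ b, x = ' ') :
    rstripSp (a ++ b) = rstripSp a := by
  unfold rstripSp
  rw [List.reverse_append, List.dropWhile_append]
  have hnil : b.reverse.dropWhile (· == ' ') = [] := by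
    rw [List.dropWhile_eq_nil_iff]
    intro x hx
    simp [hb x (List.mem_reverse.mp hx)]
  simp [hnil]

lemma rstripSp_append_nonspace (a : List Char) (c : Char) (hc : c ≠ ' ') :
    rstripSp (a ++ [c]) = a ++ [c] := by
  unfold rstripSp
  simp [hc]

-- the invariant tying A's state (k, nl, sp, br) to B's state (k, out)
def InvAB (k : Int) (nl sp br out : List Char) : Prop :=
  (k = 0 ∧ out = nl ++ sp ∧ (∀ x ∈ sp, x = ' ') ∧ rstripSp nl = nl) ∨
  (0 < k ∧ out = nl ++ br ∧ sp = [])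

lemma main_loop (cs : List Char) : ∀ (k : Int) (nl sp br out : List Char),
    (∀ p, p <+: cs → 0 ≤ k + bal p) → k + bal cs = 0 →
    InvAB k nl sp br out →
    (cs.foldl stepA (k, nl, sp, br)).2.1 = rstripSp (cs.foldl stepB (k, out)).2 := by
  induction cs with
  | nil =>
    intro k nl sp br out hpos htot hinv
    have hk : k = 0 := by simpa [bal] using htot
    rcases hinv with ⟨_, hout, hsp, hnl⟩ | ⟨hk', _, _⟩
    · simp only [List.foldl_nil]
      rw [hout, rstripSp_append_spaces _ _ hsp, hnl]
    · omega
  | cons c cs ih =>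
    intro k nl sp br out hpos htot hinv
    have hk0 : 0 ≤ k := by simpa [bal] using hpos [] (List.nil_prefix)
    have hkc : 0 ≤ k + brDelta c := by
      have := hpos [c] (List.cons_prefix_cons.mpr ⟨rfl, List.nil_prefix⟩)
      simpa [bal] using this
    have htot' : (k + brDelta c) + bal cs = 0 := by rw [bal_cons] at htot; omega
    have hpos' : ∀ p, p <+: cs → 0 ≤ (k + brDelta c) + bal p := by
      intro p hp
      have := hpos (c :: p) (List.cons_prefix_cons.mpr ⟨rfl, hp⟩)
      rw [bal_cons] at this; omega
    simp only [List.foldl_cons]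
    rcases hinv with ⟨hk, hout, hsp, hnl⟩ | ⟨hkpos, hout, hsp⟩
    · -- k = 0
      subst hk
      by_cases hpar : c = '('
      · -- open at depth 0
        subst hpar
        have hA : stepA (0, nl, sp, br) '(' = (1, nl ++ ['('], [], []) := by
          simp [stepA]
        have hB : stepB (0, out) '(' = (1, rstripSp out ++ ['(']) := by
          simp [stepB]
        rw [hA, hB]
        apply ih _ _ _ _ _ (by simpa [brDelta] using hpos') (by simpa [brDelta] using htot')
        refine Or.inr ⟨by omega, ?_, rfl⟩
        rw [hout, rstripSp_append_spaces _ _ hsp, hnl, List.append_nil]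
      · by_cases hcl : c = ')'
        · -- close at depth 0: impossible, balance would go negative
          exfalso; subst hcl; simp [brDelta] at hkc
        · by_cases hspc : c = ' '
          · subst hspc
            have hA : stepA (0, nl, sp, br) ' ' = (0, nl, sp ++ [' '], br) := by
              simp [stepA]
            have hB : stepB (0, out) ' ' = (0, out ++ [' ']) := by
              simp [stepB]
            rw [hA, hB]
            apply ih _ _ _ _ _ (by simpa [brDelta] using hpos') (by simpa [brDelta] using htot')
            refine Or.inl ⟨rfl, ?_, ?_, hnl⟩
            · rw [hout, List.append_assoc]
            · intro x hx
              rcases List.mem_append.mp hx with h | h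
              · exact hsp x h
              · simpa using h
          · -- ordinary character at depth 0
            have hA : stepA (0, nl, sp, br) c = (0, nl ++ sp ++ [c], [], br) := by
              simp [stepA, hpar, hcl, hspc]
            have hB : stepB (0, out) c = (0, out ++ [c]) := by
              simp [stepB, hpar, hcl]
            rw [hA, hB]
            apply ih _ _ _ _ _ (by simpa [brDelta, hpar, hcl] using hpos')
              (by simpa [brDelta, hpar, hcl] using htot')
            refine Or.inl ⟨rfl, ?_, by simp, rstripSp_append_nonspace _ _ hspc⟩
            rw [hout]; simp
    · -- 0 < k
      subst hsp
      have hkne : k ≠ 0 := by omega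
      by_cases hpar : c = '('
      · subst hpar
        have hA : stepA (k, nl, [], br) '(' = (k + 1, nl, [], br ++ ['(']) := by
          simp [stepA, hkne]
        have hB : stepB (k, out) '(' = (k + 1, out ++ ['(']) := by
          simp [stepB, hkne]
        rw [hA, hB]
        apply ih _ _ _ _ _ (by simpa [brDelta] using hpos') (by simpa [brDelta] using htot')
        exact Or.inr ⟨by omega, by rw [hout, List.append_assoc], rfl⟩
      · by_cases hcl : c = ')'
        · subst hcl
          by_cases hk1 : k = 1
          · subst hk1
            have hA : stepA (1, nl, [], br) ')' = (0, nl ++ br ++ [')'], [], br) := by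
              simp [stepA]
            have hB : stepB (1, out) ')' = (0, out ++ [')']) := by
              simp [stepB]
            rw [hA, hB]
            apply ih _ _ _ _ _ (by simpa [brDelta] using hpos') (by simpa [brDelta] using htot')
            refine Or.inl ⟨rfl, ?_, by simp, rstripSp_append_nonspace _ _ (by decide)⟩
            rw [hout]; simp
          · have hk1ne : k - 1 ≠ 0 := fun h => hk1 (by omega)
            have hA : stepA (k, nl, [], br) ')' = (k - 1, nl, [], br ++ [')']) := by
              simp [stepA, hk1ne]
            have hB : stepB (k, out) ')' = (k - 1, out ++ [')']) := by
              simp [stepB]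
            rw [hA, hB]
            apply ih _ _ _ _ _ (by simpa [brDelta] using hpos') (by simpa [brDelta] using htot')
            exact Or.inr ⟨by omega, by rw [hout, List.append_assoc], rfl⟩
        · -- ordinary character at depth > 0
          have hA : stepA (k, nl, [], br) c = (k, nl, [], br ++ [c]) := by
            simp [stepA, hpar, hcl, hkne]
          have hB : stepB (k, out) c = (k, out ++ [c]) := by
            simp [stepB, hpar, hcl]
          rw [hA, hB]
          apply ih _ _ _ _ _ (by simpa [brDelta, hpar, hcl] using hpos')
            (by simpa [brDelta, hpar, hcl] using htot')
          exact Or.inr ⟨hkpos, by rw [hout, List.append_assoc], rfl⟩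

-- ===== VERDICT (by name: the statement is the Claim_ definition above) =====
theorem digest_brackets_spec : Claim_equal_digest_brackets := by
  intro rsline _ hpre
  unfold Spec_digest_brackets digest_brackets digest_brackets_alt
  congr 1
  apply main_loop rsline.toList 0 [] [] [] []
  · intro p hp
    have := hpre.1 p (by simpa using hp)
    omega
  · have := hpre.2; omega
  · exact Or.inl ⟨rfl, rfl, by simp, rfl⟩
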